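-- pv_equiv track=rewrite | github.com/raeez/chiral-bar-cobar | compute/lib/bc_quantum_group_roots_engine.py | _slN_positive_roots
-- ===== SOURCE A (Python) =====
-- from typing import Any, Dict, List, Optional, Tuple, Union
--
-- def _slN_positive_roots(N: int) -> List[Tuple[int, ...]]:
--     """Positive roots of sl_N = A_{N-1}.
--
--     The positive roots are e_i - e_j for 1 <= i < j <= N.
--     In simple root coordinates: alpha_{i,j} = alpha_i + alpha_{i+1} + ... + alpha_{j-1}.
--     """
--     rank = N - 1
--     roots = []
--     for i in range(rank):
--         for j in range(i, rank):
--             root = tuple(1 if i <= m <= j else 0 for m in range(rank))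
--             roots.append(root)
--     return roots
-- ===== SOURCE B (Python) =====
-- def _slN_positive_roots(N):
--     """Positive roots of sl_N in simple-root coordinates, by recursion on the
--     rank with an accumulated zero-padding: emit the staircase block of roots
--     supported on a prefix starting right after the padding, then recurse on
--     the next-smaller rank with one more padding zero."""
--     def rec(r, pad):
--         if r <= 0:
--             return []
--         head = [(0,) * pad + (1,) * k + (0,) * (r - k) for k in range(1, r + 1)]
--         return head + rec(r - 1, pad + 1)
--     return rec(N - 1, 0)
-- ===== Notes on version B (the rewrite author's own statement) =====
-- stated objective: alternative
-- what changed: B replaces the nested start/end index loops with their per-entry comparison comprehension by structural recursion on the rank with an accumulated zero padding: emit the staircase block of padded prefix vectors built by segment replication, then recurse on the next-smaller rank with the padding grown by a single zero.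
import Mathlib
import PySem

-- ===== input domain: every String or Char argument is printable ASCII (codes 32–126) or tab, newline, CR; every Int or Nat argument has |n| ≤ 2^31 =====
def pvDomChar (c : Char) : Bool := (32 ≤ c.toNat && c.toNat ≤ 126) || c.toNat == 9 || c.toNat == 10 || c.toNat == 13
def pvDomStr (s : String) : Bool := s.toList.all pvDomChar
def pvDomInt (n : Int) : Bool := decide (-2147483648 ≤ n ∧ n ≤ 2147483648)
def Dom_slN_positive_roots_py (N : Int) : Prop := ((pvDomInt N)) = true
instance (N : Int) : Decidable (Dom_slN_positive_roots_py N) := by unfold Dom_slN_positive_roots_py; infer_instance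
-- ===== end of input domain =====

-- B builds the root list by structural recursion on the rank with an
-- accumulated zero padding (staircase block of padded prefix vectors, then the
-- next-smaller rank with the padding grown) instead of A's nested index loops
-- with a per-entry comparison comprehension; objective: alternative.

-- ===== PORT A =====
def slN_positive_roots_py (N : Int) : List (List Int) :=
  let rank := N - 1
  (PySem.List.pyRange 0 rank 1).foldl (fun roots i =>
    (PySem.List.pyRange i rank 1).foldl (fun roots j =>
      roots ++ [(PySem.List.pyRange 0 rank 1).map
        (fun m => if i ≤ m ∧ m ≤ j then (1 : Int) else 0)]) roots) []

-- ===== PORT B =====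
-- head of rec(r, pad): the rows (0,)*pad + (1,)*k + (0,)*(r-k) for k in range(1, r+1)
def pvBlock (pad r : Int) : List (List Int) :=
  (PySem.List.pyRange 1 (r + 1) 1).map
    (fun k => List.replicate pad.toNat (0 : Int)
      ++ List.replicate k.toNat (1 : Int) ++ List.replicate (r - k).toNat (0 : Int))

def pvRec (r pad : Int) : List (List Int) :=
  if r ≤ 0 then []
  else pvBlock pad r ++ pvRec (r - 1) (pad + 1)
termination_by r.toNat
decreasing_by omega

def slN_positive_roots_py_alt (N : Int) : List (List Int) := pvRec (N - 1) 0

-- ===== PRECONDITION & SPEC =====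
def Spec_slN_positive_roots_py (N : Int) (out : List (List Int)) : Prop := out = slN_positive_roots_py_alt N
instance (N : Int) (out : List (List Int)) : Decidable (Spec_slN_positive_roots_py N out) := by unfold Spec_slN_positive_roots_py; infer_instance

-- ===== CLAIM (what is proved, stated in full; the proofs are below) =====
def Claim_equal_slN_positive_roots_py : Prop := ∀ (N : Int), Dom_slN_positive_roots_py N → Spec_slN_positive_roots_py N (slN_positive_roots_py N)

-- ===== LEMMAS AND PROOFS =====

/-- The root vector A builds for the pair (i, j) at rank r. -/
def pvRow (r i j : Int) : List Int :=
  (PySem.List.pyRange 0 r 1).map (fun m => if i ≤ m ∧ m ≤ j then (1 : Int) else 0)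

/-- A's nested appending loops as a flatMap of maps. -/
def pvF (r : Int) : List (List Int) :=
  (PySem.List.pyRange 0 r 1).flatMap (fun i => (PySem.List.pyRange i r 1).map (pvRow r i))

lemma pvA_eq_F (N : Int) : slN_positive_roots_py N = pvF (N - 1) := by
  unfold slN_positive_roots_py pvF pvRow
  simp only [PySem.List.foldl_append_singleton_eq_map]
  rw [PySem.List.foldl_append_eq_flatMap]
  simp

lemma pvRange_shift (a b : Int) :
    PySem.List.pyRange (a + 1) (b + 1) 1 = (PySem.List.pyRange a b 1).map (· + 1) := by
  rw [PySem.List.pyRange_one, PySem.List.pyRange_one, List.map_map]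
  have : (b + 1 - (a + 1)) = b - a := by ring
  rw [this]
  exact List.map_congr_left (fun k _ => by simp [Function.comp]; omega)

lemma pvRow_length (r i j : Int) : (pvRow r i j).length = r.toNat := by
  simp [pvRow, PySem.List.length_pyRange_one]

/-- Row starting at 0: a staircase prefix vector. -/
lemma pvRow_zero (r j : Int) (h0 : 0 ≤ j) (hj : j < r) :
    pvRow r 0 j = List.replicate (j + 1).toNat (1 : Int)
      ++ List.replicate (r - (j + 1)).toNat (0 : Int) := by
  apply List.ext_getElem
  · simp [pvRow_length]; omega
  · intro m h1 h2
    have hm : m < (r - 0).toNat := by simpa [pvRow_length] using h1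
    simp only [pvRow, List.getElem_map, PySem.List.getElem_pyRange_one]
    rw [List.getElem_append]
    simp only [List.length_replicate, List.getElem_replicate]
    split_ifs <;> omega

/-- Shift: row for (i+1, j+1) at rank r is row for (i, j) at rank r-1, 0-prefixed. -/
lemma pvRow_shift (r i j : Int) (hi : 0 ≤ i) (hr : 1 ≤ r) :
    pvRow r (i + 1) (j + 1) = 0 :: pvRow (r - 1) i j := by
  apply List.ext_getElem
  · simp [pvRow_length]; omega
  · intro m h1 h2
    have hm : m < (r - 0).toNat := by simpa [pvRow_length] using h1
    match m with
    | 0 =>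
      simp only [pvRow, List.getElem_map, PySem.List.getElem_pyRange_one, List.getElem_cons_zero]
      split_ifs with h
      · omega
      · rfl
    | m + 1 =>
      simp only [pvRow, List.getElem_cons_succ, List.getElem_map,
        PySem.List.getElem_pyRange_one]
      split_ifs <;> omega

/-- The unpadded staircase block (B's head at zero padding). -/
def pvStair (r : Int) : List (List Int) :=
  (PySem.List.pyRange 1 (r + 1) 1).map
    (fun k => List.replicate k.toNat (1 : Int) ++ List.replicate (r - k).toNat (0 : Int))

/-- One unfolding of A's flatMap form: staircase block, then rank r-1 zero-prefixed. -/
lemma pvF_step (r : Int) (h : 0 < r) :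
    pvF r = pvStair r ++ (pvF (r - 1)).map (fun row => 0 :: row) := by
  unfold pvF
  rw [PySem.List.pyRange_one_cons h, List.flatMap_cons]
  congr 1
  · -- the i = 0 block is the staircase block
    unfold pvStair
    have hsh : PySem.List.pyRange 1 (r + 1) 1
        = (PySem.List.pyRange 0 r 1).map (· + 1) := by
      simpa using pvRange_shift 0 r
    rw [hsh, List.map_map]
    exact List.map_congr_left (fun j hj => by
      obtain ⟨hj0, hjr⟩ := PySem.List.mem_pyRange_one.mp hj
      simpa using pvRow_zero r j hj0 hjr)
  · -- the remaining blocks are the rank-(r-1) roots, 0-prefixed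
    simp only [zero_add]
    rw [List.map_flatMap]
    have h1 : PySem.List.pyRange 1 r 1
        = (PySem.List.pyRange 0 (r - 1) 1).map (· + 1) := by
      have := pvRange_shift 0 (r - 1)
      simpa using this
    rw [h1, List.flatMap_map]
    apply List.flatMap_congr
    intro i hi
    obtain ⟨hi0, _⟩ := PySem.List.mem_pyRange_one.mp hi
    have h2 : PySem.List.pyRange (i + 1) r 1
        = (PySem.List.pyRange i (r - 1) 1).map (· + 1) := by
      have := pvRange_shift i (r - 1)
      simpa using this
    rw [h2, List.map_map, List.map_map]
    exact List.map_congr_left (fun j _ => pvRow_shift r i j hi0 (by omega))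

/-- Padded invariant: B's rec(r, pad) is A's rank-r roots, pad zeros prefixed. -/
lemma pvF_pad_eq_rec (r pad : Int) (hpad : 0 ≤ pad) :
    (pvF r).map (fun row => List.replicate pad.toNat (0 : Int) ++ row) = pvRec r pad := by
  by_cases h : r ≤ 0
  · rw [pvRec]
    simp [pvF, PySem.List.pyRange_one_eq_nil h, h]
  · rw [pvRec]
    simp only [h, if_false]
    rw [not_le] at h
    rw [pvF_step r h, List.map_append]
    congr 1
    · unfold pvStair pvBlock
      rw [List.map_map]
      exact List.map_congr_left (fun k _ => by simp)
    · rw [← pvF_pad_eq_rec (r - 1) (pad + 1) (by omega), List.map_map]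
      apply List.map_congr_left
      intro row _
      show List.replicate pad.toNat (0 : Int) ++ 0 :: row
        = List.replicate (pad + 1).toNat (0 : Int) ++ row
      have : (pad + 1).toNat = pad.toNat + 1 := by omega
      rw [this, List.replicate_succ', List.append_assoc]
      rfl
termination_by r.toNat
decreasing_by omega

-- ===== VERDICT (by name: the statement is the Claim_ definition above) =====
theorem slN_positive_roots_py_spec : Claim_equal_slN_positive_roots_py := by
  intro N _
  unfold Spec_slN_positive_roots_py slN_positive_roots_py_alt
  rw [pvA_eq_F, ← pvF_pad_eq_rec (N - 1) 0 le_rfl]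
  simp
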